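-- pv_equiv track=rewrite | github.com/racko21/DBM_1 | generate.py | generate_letter_pool
-- ===== SOURCE A (Python) =====
-- import itertools
-- import string
--
-- def generate_letter_pool(n):
--     pool    = []
--     length  = 1
--
--     while len(pool) < n:
--         for p in itertools.product(string.ascii_lowercase, repeat=length):
--             pool.append(''.join(p))
--             if len(pool) == n:
--                 break
--         length += 1
--
--     return pool
-- ===== SOURCE B (Python) =====
-- def generate_letter_pool(n):
--     result = []
--     for i in range(n):
--         # locate the length block of index i (blocks of 26, 26^2, ...)
--         L = 1
--         block = 26
--         j = i
--         while j >= block: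
--             j -= block
--             block *= 26
--             L += 1
--         # render the offset j as an L-digit base-26 string, big-endian
--         digits = []
--         for _ in range(L):
--             j, d = divmod(j, 26)
--             digits.append(chr(97 + d))
--         digits.reverse()
--         result.append(''.join(digits))
--     return result
-- ===== Notes on version B (the rewrite author's own statement) =====
-- stated objective: alternative
-- what changed: B computes the i-th string directly for each i (subtract cumulative block sizes 26, 26^2, ... to find the length, then render the offset in base 26 big-endian) instead of A's enumeration of all tuples with itertools.product and an early break.
import Mathlib
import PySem

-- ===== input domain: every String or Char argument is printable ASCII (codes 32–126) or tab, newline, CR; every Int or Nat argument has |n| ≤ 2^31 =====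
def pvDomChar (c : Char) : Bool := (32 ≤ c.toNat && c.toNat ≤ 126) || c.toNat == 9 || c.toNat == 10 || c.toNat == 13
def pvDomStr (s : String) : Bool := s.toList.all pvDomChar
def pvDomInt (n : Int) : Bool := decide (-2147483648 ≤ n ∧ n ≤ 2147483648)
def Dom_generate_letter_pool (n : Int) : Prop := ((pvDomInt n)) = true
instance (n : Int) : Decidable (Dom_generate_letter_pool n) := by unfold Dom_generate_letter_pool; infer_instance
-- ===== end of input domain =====

-- B replaces A's itertools.product enumeration by a direct per-index computation
-- (find the length block, then render the offset in base 26); objective: alternative.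

-- ===== PORT A =====
-- string.ascii_lowercase
def asciiLowercase : List Char := "abcdefghijklmnopqrstuvwxyz".toList

-- itertools.product(string.ascii_lowercase, repeat=L), in product order (first coordinate slowest)
def prodA : Nat → List (List Char)
  | 0 => [[]]
  | L + 1 => asciiLowercase.flatMap (fun c => (prodA L).map (fun p => c :: p))

lemma prodA_ne_nil (L : Nat) : prodA L ≠ [] := by
  induction L with
  | zero => simp [prodA]
  | succ L ih =>
    simp only [prodA, asciiLowercase]
    intro h
    rw [List.flatMap_eq_nil_iff] at h
    have := h 'a' (by decide)
    simp [List.map_eq_nil_iff] at this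
    exact ih this

-- the inner for-loop: append ''.join(p) for each p, break when len(pool) == n
def innerA (n : Int) (pool : List String) : List (List Char) → List String
  | [] => pool
  | p :: ps =>
    let pool' := pool ++ [String.ofList p]
    if (pool'.length : Int) = n then pool' else innerA n pool' ps

lemma innerA_le (n : Int) : ∀ (items : List (List Char)) (pool : List String),
    pool.length ≤ (innerA n pool items).length := by
  intro items
  induction items with
  | nil => intro pool; simp [innerA]
  | cons p ps ih =>
    intro pool
    simp only [innerA]
    split
    · simp
    · have := ih (pool ++ [String.ofList p])
      simp at this
      omega

-- the outer while-loop
def aLoop (n : Int) (pool : List String) (length : Nat) : List String :=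
  if h : (pool.length : Int) < n then
    aLoop n (innerA n pool (prodA length)) (length + 1)
  else pool
termination_by n.toNat - pool.length
decreasing_by
  have hne := prodA_ne_nil length
  rcases hp : prodA length with _ | ⟨p, ps⟩
  · exact absurd hp hne
  · have h1 : pool.length + 1 ≤ (innerA n pool (p :: ps)).length := by
      simp only [innerA]
      split
      · simp
      · have := innerA_le n ps (pool ++ [String.ofList p])
        simp at this; omega
    omega

def generate_letter_pool (n : Int) : List String := aLoop n [] 1

-- ===== PORT B =====
-- the inner while-loop: (final L, remaining offset j); block is always 26^L > 0 in calls,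
-- the 0 < block guard only makes the recursion total
def bFindLen (j block L : Nat) : Nat × Nat :=
  if h : 0 < block ∧ block ≤ j then bFindLen (j - block) (block * 26) (L + 1)
  else (L, j)
termination_by j
decreasing_by omega

-- the digit loop: least-significant digit first (Python appends, then reverses)
def bDigits (j : Nat) : Nat → List Char
  | 0 => []
  | L + 1 => Char.ofNat (97 + j % 26) :: bDigits (j / 26) L

def generate_letter_pool_alt (n : Int) : List String :=
  (List.range n.toNat).map (fun i =>
    let r := bFindLen i 26 1
    String.ofList ((bDigits r.2 r.1).reverse))

-- ===== PRECONDITION & SPEC =====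
def Spec_generate_letter_pool (n : Int) (out : List String) : Prop := out = generate_letter_pool_alt n
instance (n : Int) (out : List String) : Decidable (Spec_generate_letter_pool n out) := by unfold Spec_generate_letter_pool; infer_instance

-- ===== CLAIM (what is proved, stated in full; the proofs are below) =====
def Claim_equal_generate_letter_pool : Prop := ∀ (n : Int), Dom_generate_letter_pool n → Spec_generate_letter_pool n (generate_letter_pool n)

-- ===== LEMMAS AND PROOFS =====

-- cumulative block sizes: totalR B L = 26^B + 26^(B+1) + ... + 26^(B+L-1)
def totalR (B : Nat) : Nat → Nat
  | 0 => 0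
  | L + 1 => 26 ^ B + totalR (B + 1) L

-- full enumeration of all strings of lengths 1..L
def enumAll : Nat → List String
  | 0 => []
  | L + 1 => enumAll L ++ (prodA (L + 1)).map String.ofList

-- the function B applies to each index
def bVal (i : Nat) : String :=
  let r := bFindLen i 26 1
  String.ofList ((bDigits r.2 r.1).reverse)

lemma totalR_succ (B L : Nat) : totalR B (L + 1) = totalR B L + 26 ^ (B + L) := by
  induction L generalizing B with
  | zero => simp [totalR]
  | succ L ih =>
    show 26 ^ B + totalR (B + 1) (L + 1) = 26 ^ B + totalR (B + 1) L + 26 ^ (B + (L + 1))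
    rw [ih (B + 1)]
    ring_nf

lemma totalR_ge (L : Nat) : L ≤ totalR 1 L := by
  induction L with
  | zero => simp [totalR]
  | succ L ih =>
    rw [totalR_succ]
    have : 0 < 26 ^ (1 + L) := Nat.pow_pos (by norm_num)
    omega

lemma totalR_mono (L K : Nat) : totalR 1 L ≤ totalR 1 (L + K) := by
  induction K with
  | zero => simp
  | succ K ih =>
    rw [show L + (K + 1) = (L + K) + 1 by ring, totalR_succ]
    exact le_trans ih (Nat.le_add_right _ _)

lemma length_prodA (L : Nat) : (prodA L).length = 26 ^ L := by
  induction L with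
  | zero => simp [prodA]
  | succ L ih =>
    have key : ∀ l : List Char, (l.flatMap (fun c => (prodA L).map (fun p => c :: p))).length
        = l.length * 26 ^ L := by
      intro l
      induction l with
      | nil => simp
      | cons c cs ihc => simp [List.flatMap_cons, ihc, ih]; ring
    rw [prodA, key]
    rw [show asciiLowercase.length = 26 from rfl]
    ring

lemma length_enumAll (L : Nat) : (enumAll L).length = totalR 1 L := by
  induction L with
  | zero => simp [enumAll, totalR]
  | succ L ih =>
    simp [enumAll, ih, length_prodA, totalR_succ]
    omega

-- base-26 carry lemma for the digit renderer
lemma bDigits_carry (L d j : Nat) (hj : j < 26 ^ L) :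
    (bDigits (d * 26 ^ L + j) (L + 1)).reverse
      = Char.ofNat (97 + d % 26) :: (bDigits j L).reverse := by
  induction L generalizing d j with
  | zero =>
    interval_cases j
    simp [bDigits]
  | succ L ih =>
    have h26 : (0:Nat) < 26 := by norm_num
    have hmod : (d * 26 ^ (L + 1) + j) % 26 = j % 26 := by
      have : 26 ∣ d * 26 ^ (L + 1) := ⟨d * 26 ^ L, by ring⟩
      omega
    have hdiv : (d * 26 ^ (L + 1) + j) / 26 = d * 26 ^ L + j / 26 := by
      rw [show d * 26 ^ (L + 1) + j = 26 * (d * 26 ^ L) + j by ring]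
      rw [Nat.mul_add_div h26]
    have hj' : j / 26 < 26 ^ L := by
      rw [Nat.div_lt_iff_lt_mul h26]
      rw [pow_succ] at hj
      exact hj
    show ((Char.ofNat (97 + (d * 26 ^ (L+1) + j) % 26)) :: bDigits ((d * 26 ^ (L+1) + j) / 26) (L+1)).reverse = _
    rw [hmod, hdiv, List.reverse_cons, ih d (j / 26) hj']
    show _ = Char.ofNat (97 + d % 26) :: (Char.ofNat (97 + j % 26) :: bDigits (j / 26) L).reverse
    rw [List.reverse_cons]
    simp

-- range decomposition: range (a*b) as blocks
lemma range_mul (a b : Nat) :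
    List.range (a * b) = (List.range a).flatMap (fun d => (List.range b).map (fun j => d * b + j)) := by
  induction a with
  | zero => simp
  | succ a ih =>
    rw [Nat.succ_mul, List.range_add, ih, List.range_succ, List.flatMap_append]
    simp [List.flatMap]

-- A's product list, characterised index by index
lemma prodA_eq_map (L : Nat) :
    prodA L = (List.range (26 ^ L)).map (fun i => (bDigits i L).reverse) := by
  induction L with
  | zero => simp [prodA, bDigits]
  | succ L ih =>
    have hlet : asciiLowercase = (List.range 26).map (fun d => Char.ofNat (97 + d % 26)) := by decide
    rw [prodA, ih, hlet]
    rw [show (26:Nat) ^ (L + 1) = 26 * 26 ^ L by ring, range_mul, List.map_flatMap,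
      List.flatMap_map]
    apply List.flatMap_congr
    intro d hd
    rw [List.map_map, List.map_map]
    apply List.map_congr_left
    intro j hj
    simp only [Function.comp]
    rw [bDigits_carry L d j (List.mem_range.mp hj)]

-- B's while-loop, characterised: peeling blocks 26^B, 26^(B+1), ...
lemma bFindLen_spec (L B i : Nat) (hi : i < 26 ^ (B + L)) :
    bFindLen (totalR B L + i) (26 ^ B) B = (B + L, i) := by
  induction L generalizing B i with
  | zero =>
    rw [bFindLen]
    simp only [totalR, Nat.zero_add]
    rw [dif_neg (by simp at hi; omega)]
    simp
  | succ L ih =>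
    have hpos : 0 < 26 ^ B := Nat.pow_pos (by norm_num)
    rw [show totalR B (L + 1) = 26 ^ B + totalR (B + 1) L from rfl]
    rw [bFindLen, dif_pos ⟨hpos, by omega⟩]
    rw [show 26 ^ B + totalR (B + 1) L + i - 26 ^ B = totalR (B + 1) L + i by omega]
    rw [show (26:Nat) ^ B * 26 = 26 ^ (B + 1) by ring]
    rw [ih (B + 1) i (by rw [show B + 1 + L = B + (L + 1) by ring]; exact hi)]
    congr 1
    omega

-- the i-th element of the full enumeration is B's value
lemma enumAll_getElem (L : Nat) : ∀ i, i < totalR 1 L → (enumAll L)[i]? = some (bVal i) := by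
  induction L with
  | zero => intro i hi; simp [totalR] at hi
  | succ L ih =>
    intro i hi
    rw [enumAll, List.getElem?_append]
    by_cases hlt : i < (enumAll L).length
    · rw [if_pos hlt]
      exact ih i (by rwa [length_enumAll] at hlt)
    · rw [if_neg hlt]
      rw [length_enumAll] at hlt
      set j := i - totalR 1 L with hj
      have hji : i = totalR 1 L + j := by omega
      have hjlt : j < 26 ^ (1 + L) := by
        rw [totalR_succ] at hi; omega
      have hjlt' : j < 26 ^ (L + 1) := by
        rw [show L + 1 = 1 + L by ring]; exact hjlt
      rw [prodA_eq_map, List.map_map, length_enumAll]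
      rw [show i - totalR 1 L = j from rfl]
      rw [List.getElem?_map, List.getElem?_range hjlt']
      simp only [Option.map_some, Function.comp]
      unfold bVal
      rw [hji, show (26:Nat) = 26 ^ 1 by norm_num] 
      rw [bFindLen_spec L 1 j (by simpa using hjlt)]
      simp [Nat.add_comm 1 L]

-- B equals a prefix of the full enumeration
lemma alt_eq_take (n : Int) (L : Nat) (hL : n.toNat ≤ totalR 1 L) :
    generate_letter_pool_alt n = (enumAll L).take n.toNat := by
  apply List.ext_getElem?
  intro i
  by_cases hi : i < n.toNat
  · rw [List.getElem?_take, if_pos hi]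
    unfold generate_letter_pool_alt
    rw [List.getElem?_map, List.getElem?_range hi]
    rw [enumAll_getElem L i (by omega)]
    rfl
  · rw [List.getElem?_take, if_neg hi]
    unfold generate_letter_pool_alt
    rw [List.getElem?_map, List.getElem?_eq_none (by simpa using hi)]
    rfl

-- prefixes of the enumeration are stable once long enough
lemma enumAll_take_stable (L K m : Nat) (hm : m ≤ totalR 1 L) :
    (enumAll (L + K)).take m = (enumAll L).take m := by
  induction K with
  | zero => rfl
  | succ K ih =>
    rw [show L + (K + 1) = (L + K) + 1 by ring, enumAll,
      List.take_append_of_le_length (by rw [length_enumAll]; exact le_trans hm (totalR_mono L K))]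
    exact ih

-- the inner loop is "append until the pool reaches n"
lemma innerA_eq (n : Int) : ∀ (items : List (List Char)) (pool : List String),
    (pool.length : Int) < n →
    innerA n pool items = pool ++ (items.map String.ofList).take (n.toNat - pool.length) := by
  intro items
  induction items with
  | nil => intro pool _; simp [innerA]
  | cons p ps ih =>
    intro pool hlt
    have hk : 1 ≤ n.toNat - pool.length := by omega
    rw [innerA]
    by_cases he : ((pool ++ [String.ofList p]).length : Int) = n
    · rw [if_pos he]
      have : n.toNat - pool.length = 1 := by simp at he; omega
      rw [this]
      simp
    · rw [if_neg he]
      have hlt' : ((pool ++ [String.ofList p]).length : Int) < n := by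
        simp at he ⊢; omega
      rw [ih (pool ++ [String.ofList p]) hlt']
      have : n.toNat - (pool ++ [String.ofList p]).length = (n.toNat - pool.length) - 1 := by
        simp; omega
      rw [this]
      rcases Nat.exists_eq_add_of_le hk with ⟨k, hk'⟩
      rw [hk', Nat.add_comm 1 k]
      simp [List.take_succ_cons]

-- the outer loop: invariant "pool is the n-prefix of the enumeration so far"
lemma aLoop_eq (n : Int) (K : Nat) : ∀ L : Nat, n.toNat ≤ totalR 1 (L + K) →
    aLoop n ((enumAll L).take n.toNat) (L + 1) = (enumAll (L + K)).take n.toNat := by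
  induction K with
  | zero =>
    intro L hL
    simp only [Nat.add_zero] at hL ⊢
    have hlen : ((enumAll L).take n.toNat).length = n.toNat := by
      rw [List.length_take, length_enumAll]; omega
    rw [aLoop, dif_neg (by rw [hlen]; omega)]
  | succ K ih =>
    intro L hL
    rw [aLoop]
    by_cases hlt : (((enumAll L).take n.toNat).length : Int) < n
    · rw [dif_pos hlt]
      have hfull : totalR 1 L < n.toNat := by
        have h2 : ((enumAll L).take n.toNat).length < n.toNat := by omega
        rw [List.length_take, length_enumAll] at h2
        omega
      have hpool : (enumAll L).take n.toNat = enumAll L :=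
        List.take_of_length_le (by rw [length_enumAll]; omega)
      rw [innerA_eq n _ _ hlt, hpool]
      have hstep : enumAll L ++ ((prodA (L+1)).map String.ofList).take (n.toNat - (enumAll L).length)
          = (enumAll (L + 1)).take n.toNat := by
        rw [show enumAll (L + 1) = enumAll L ++ (prodA (L + 1)).map String.ofList from rfl]
        rw [List.take_append, List.take_of_length_le (l := enumAll L) (by rw [length_enumAll]; omega)]
      rw [hstep]
      have := ih (L + 1) (by rw [show L + 1 + K = L + (K + 1) by ring]; exact hL)
      rw [this, show L + 1 + K = L + (K + 1) by ring]
    · rw [dif_neg hlt]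
      have hm : n.toNat ≤ totalR 1 L := by
        by_contra hc
        apply hlt
        have hl2 : ((enumAll L).take n.toNat).length = totalR 1 L := by
          rw [List.length_take, length_enumAll]; omega
        rw [hl2]
        omega
      rw [enumAll_take_stable L (K + 1) n.toNat hm]

-- ===== VERDICT (by name: the statement is the Claim_ definition above) =====
theorem generate_letter_pool_spec : Claim_equal_generate_letter_pool := by
  intro n _
  unfold Spec_generate_letter_pool generate_letter_pool
  have h0 : ([] : List String) = (enumAll 0).take n.toNat := by simp [enumAll]
  rw [h0]
  rw [show (1:Nat) = 0 + 1 from rfl, aLoop_eq n n.toNat 0 (by simpa using totalR_ge n.toNat)]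
  rw [alt_eq_take n n.toNat (totalR_ge n.toNat)]
  simp
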